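-- pv_equiv track=rewrite | github.com/H4K33L/lifegame | Load.py | GridRegen
-- ===== SOURCE A (Python) =====
-- def GridRegen(length, position):
--     """
--     Input : length an int, position a array of tuples
--     output : Grid an aray of array fill by 1 and 0
--     This function
--     """
--
--     # Error case, if a stupid user try to be a fool
--     if not 251 > length > 0 :
--         return [[0,0,0,0,0,0,0,0,0,0,0,0,0,0,0,0,0,0,0,0],[0,0,0,0,0,0,0,0,0,0,0,0,0,0,0,0,0,0,0,0],[0,0,0,0,0,0,0,0,0,0,0,0,0,0,0,0,0,0,0,0],[0,0,0,0,0,0,0,0,0,0,0,0,0,0,0,0,0,0,0,0],[0,0,0,0,1,0,0,0,0,0,0,0,0,0,0,1,0,0,0,0],[0,0,0,0,1,0,0,0,0,0,0,0,0,0,0,1,0,0,0,0],[0,0,0,1,0,1,0,0,0,0,0,0,0,0,1,0,1,0,0,0],[0,0,0,0,0,0,0,0,0,0,0,0,0,0,0,0,0,0,0,0],[0,0,0,0,0,0,0,0,0,0,0,0,0,0,0,0,0,0,0,0],[0,0,0,0,0,0,0,0,0,0,0,0,0,0,0,0,0,0,0,0],[0,0,0,0,0,0,0,0,0,0,0,0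,0,0,0,0,0,0,0,0],[0,0,0,0,0,0,0,0,0,0,0,0,0,0,0,0,0,0,0,0],[0,0,0,0,0,0,0,0,0,0,0,0,0,0,0,0,0,0,0,0],[0,0,0,0,0,0,0,0,0,0,0,0,0,0,0,0,0,0,0,0],[0,0,0,1,0,1,0,0,0,0,0,0,0,0,1,0,1,0,0,0],[0,0,0,0,1,0,0,0,0,0,0,0,0,0,0,1,0,0,0,0],[0,0,0,0,1,0,0,0,0,0,0,0,0,0,0,1,0,0,0,0],[0,0,0,0,0,0,0,0,0,0,0,0,0,0,0,0,0,0,0,0],[0,0,0,0,0,0,0,0,0,0,0,0,0,0,0,0,0,0,0,0],[0,0,0,0,0,0,0,0,0,0,0,0,0,0,0,0,0,0,0,0]]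
--     elif len(position) > length*length :
--         return [[0,0,0,0,0,0,0,0,0],[0,0,0,0,0,0,0,0,0],[0,0,0,0,0,0,0,0,0],[0,0,0,0,1,0,0,0,0],[0,0,0,0,1,0,0,0,0],[0,0,0,1,0,1,0,0,0],[0,0,0,0,0,0,0,0,0],[0,0,0,0,0,0,0,0,0],[0,0,0,0,0,0,0,0,0]]
--     for cordinate in position :
--         if cordinate[0] < 0 or cordinate[0] > length-1 or cordinate[1] < 0 or cordinate[1] > length-1 :
--             return [[0,0,0,0,0,0,0,0,0,0],[0,0,0,0,0,0,0,0,0,0],[0,0,1,0,0,0,0,1,0,0],[0,0,0,1,0,0,1,0,0,0],[0,0,0,0,1,1,0,0,0,0],[0,0,0,0,1,1,0,0,0,0],[0,0,0,1,0,0,1,0,0,0],[0,0,1,0,0,0,0,1,0,0],[0,0,0,0,0,0,0,0,0,0],[0,0,0,0,0,0,0,0,0,0]]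
--     # Regenerate the grid based on saved length and alive cell positions
--     Grid = []
--     for i in range(length):
--         Line = []
--         for j in range(length):
--             Line.append(0)
--         Grid.append(Line)
--     for coordinate in position:
--         Grid[coordinate[0]][coordinate[1]] = 1
--
--     return Grid
-- ===== SOURCE B (Python) =====
-- # The three hardcoded error grids, expressed as (size, live cells) and rendered
-- # by B's own row builder.
-- _BAD_LENGTH_CELLS = [(4, 4), (4, 15), (5, 4), (5, 15), (6, 3), (6, 5), (6, 14), (6, 16), (14, 3), (14, 5), (14, 14), (14, 16), (15, 4), (15, 15), (16, 4), (16, 15)]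
-- _OVERFULL_CELLS = [(3, 4), (4, 4), (5, 3), (5, 5)]
-- _OUT_OF_RANGE_CELLS = [(2, 2), (2, 7), (3, 3), (3, 6), (4, 4), (4, 5), (5, 4), (5, 5), (6, 3), (6, 6), (7, 2), (7, 7)]
--
-- def _render(length, position):
--     # Run-length construction: each row is assembled from the gaps between its
--     # sorted live columns (a zero run between consecutive live columns, a one at
--     # each), not by writing into a pre-allocated zero grid.
--     grid = []
--     for i in range(length):
--         cols = sorted({c[1] for c in position if c[0] == i})
--         row = []
--         prev = -1
--         for j in cols:
--             row.extend([0] * (j - prev - 1))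
--             row.append(1)
--             prev = j
--         row.extend([0] * (length - prev - 1))
--         grid.append(row)
--     return grid
--
-- def GridRegen(length, position):
--     if not 251 > length > 0 :
--         return _render(20, _BAD_LENGTH_CELLS)
--     elif len(position) > length*length :
--         return _render(9, _OVERFULL_CELLS)
--     for cordinate in position :
--         if cordinate[0] < 0 or cordinate[0] > length-1 or cordinate[1] < 0 or cordinate[1] > length-1 :
--             return _render(10, _OUT_OF_RANGE_CELLS)
--     return _render(length, position)
-- ===== Notes on version B (the rewrite author's own statement) =====
-- stated objective: alternative
-- what changed: The zero-fill-then-scatter grid construction is replaced by a sort-then-scan algorithm: for each row the distinct live columns are sorted and the row is assembled by run-length gap filling (a zero run between consecutive live columns, a one at each), so no pre-allocated grid and no per-cell write or membership test exists.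
import Mathlib
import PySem

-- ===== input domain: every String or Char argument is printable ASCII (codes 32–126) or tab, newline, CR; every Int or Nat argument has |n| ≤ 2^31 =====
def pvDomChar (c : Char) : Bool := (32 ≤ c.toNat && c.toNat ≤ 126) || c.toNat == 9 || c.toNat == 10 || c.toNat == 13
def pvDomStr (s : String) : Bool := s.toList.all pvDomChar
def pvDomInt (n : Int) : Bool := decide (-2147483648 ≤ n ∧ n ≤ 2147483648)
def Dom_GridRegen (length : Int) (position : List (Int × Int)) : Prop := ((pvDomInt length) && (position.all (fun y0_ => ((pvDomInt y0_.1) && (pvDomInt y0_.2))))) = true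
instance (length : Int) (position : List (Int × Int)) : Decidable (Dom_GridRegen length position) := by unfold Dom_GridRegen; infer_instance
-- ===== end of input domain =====

-- B replaces A's zero-fill + scatter grid construction by a sort-then-scan per row:
-- the distinct live columns of each row are sorted and the row is assembled by
-- run-length gap filling (objective: alternative); the four guard branches are unchanged.

-- ===== PORT A =====
-- A: zero-fill the grid with two nested range loops, then scatter 1s at the positions.
-- Grid[c][d] = 1 is exact as modify/set with .toNat: the preceding guard guarantees 0 ≤ c,d < length.
def GridRegen (length : Int) (position : List (Int × Int)) : List (List Int) :=
  if ¬ (251 > length ∧ length > 0) then ([[0,0,0,0,0,0,0,0,0,0,0,0,0,0,0,0,0,0,0,0],[0,0,0,0,0,0,0,0,0,0,0,0,0,0,0,0,0,0,0,0],[0,0,0,0,0,0,0,0,0,0,0,0,0,0,0,0,0,0,0,0],[0,0,0,0,0,0,0,0,0,0,0,0,0,0,0,0,0,0,0,0],[0,0,0,0,1,0,0,0,0,0,0,0,0,0,0,1,0,0,0,0],[0,0,0,0,1,0,0,0,0,0,0,0,0,0,0,1,0,0,0,0],[0,0,0,1,0,1,0,0,0,0,0,0,0,0,1,0,1,0,0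,0],[0,0,0,0,0,0,0,0,0,0,0,0,0,0,0,0,0,0,0,0],[0,0,0,0,0,0,0,0,0,0,0,0,0,0,0,0,0,0,0,0],[0,0,0,0,0,0,0,0,0,0,0,0,0,0,0,0,0,0,0,0],[0,0,0,0,0,0,0,0,0,0,0,0,0,0,0,0,0,0,0,0],[0,0,0,0,0,0,0,0,0,0,0,0,0,0,0,0,0,0,0,0],[0,0,0,0,0,0,0,0,0,0,0,0,0,0,0,0,0,0,0,0],[0,0,0,0,0,0,0,0,0,0,0,0,0,0,0,0,0,0,0,0],[0,0,0,1,0,1,0,0,0,0,0,0,0,0,1,0,1,0,0,0],[0,0,0,0,1,0,0,0,0,0,0,0,0,0,0,1,0,0,0,0],[0,0,0,0,1,0,0,0,0,0,0,0,0,0,0,1,0,0,0,0],[0,0,0,0,0,0,0,0,0,0,0,0,0,0,0,0,0,0,0,0],[0,0,0,0,0,0,0,0,0,0,0,0,0,0,0,0,0,0,0,0],[0,0,0,0,0,0,0,0,0,0,0,0,0,0,0,0,0,0,0,0]] : List (List Int))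
  else if (position.length : Int) > length * length then ([[0,0,0,0,0,0,0,0,0],[0,0,0,0,0,0,0,0,0],[0,0,0,0,0,0,0,0,0],[0,0,0,0,1,0,0,0,0],[0,0,0,0,1,0,0,0,0],[0,0,0,1,0,1,0,0,0],[0,0,0,0,0,0,0,0,0],[0,0,0,0,0,0,0,0,0],[0,0,0,0,0,0,0,0,0]] : List (List Int))
  else if position.any (fun c => c.1 < 0 || c.1 > length - 1 || c.2 < 0 || c.2 > length - 1) then
    ([[0,0,0,0,0,0,0,0,0,0],[0,0,0,0,0,0,0,0,0,0],[0,0,1,0,0,0,0,1,0,0],[0,0,0,1,0,0,1,0,0,0],[0,0,0,0,1,1,0,0,0,0],[0,0,0,0,1,1,0,0,0,0],[0,0,0,1,0,0,1,0,0,0],[0,0,1,0,0,0,0,1,0,0],[0,0,0,0,0,0,0,0,0,0],[0,0,0,0,0,0,0,0,0,0]] : List (List Int))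
  else
    position.foldl (fun g c => g.modify c.1.toNat (fun row => row.set c.2.toNat 1))
      ((PySem.List.pyRange 0 length 1).foldl (fun g _i =>
        g ++ [(PySem.List.pyRange 0 length 1).foldl (fun line _j => line ++ [(0 : Int)]) []]) [])

-- ===== PORT B =====
-- B's inner row loop: structural recursion over the sorted live columns with the same
-- state (the row built so far, the previous live column); '[0]*(m)' with m ≤ 0 is []
-- in Python, matched exactly by List.replicate m.toNat.
def pvRowFrom (n prev : Int) (acc : List Int) (cols : List Int) : List Int :=
  match cols with
  | [] => acc ++ List.replicate (n - prev - 1).toNat 0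
  | j :: rest => pvRowFrom n j (acc ++ List.replicate (j - prev - 1).toNat 0 ++ [1]) rest

-- B's _render: per row, sort the set of that row's live columns and assemble the row by gap filling.
def pvRender (length : Int) (position : List (Int × Int)) : List (List Int) :=
  (PySem.List.pyRange 0 length 1).foldl (fun grid i =>
    grid ++ [pvRowFrom length (-1) []
      (PySem.List.sorted (PySem.Set.ofList ((position.filter (fun c => c.1 == i)).map (·.2)))
        (fun x => x) false)]) []

-- B's three error patterns as (size, live cells), rendered by B's own builder
def pvBadLengthCells : List (Int × Int) := [(4, 4), (4, 15), (5, 4), (5, 15), (6, 3), (6, 5), (6, 14), (6, 16), (14, 3), (14, 5), (14, 14), (14, 16), (15, 4), (15, 15), (16, 4), (16, 15)]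
def pvOverfullCells : List (Int × Int) := [(3, 4), (4, 4), (5, 3), (5, 5)]
def pvOutOfRangeCells : List (Int × Int) := [(2, 2), (2, 7), (3, 3), (3, 6), (4, 4), (4, 5), (5, 4), (5, 5), (6, 3), (6, 6), (7, 2), (7, 7)]

def GridRegen_alt (length : Int) (position : List (Int × Int)) : List (List Int) :=
  if ¬ (251 > length ∧ length > 0) then pvRender 20 pvBadLengthCells
  else if (position.length : Int) > length * length then pvRender 9 pvOverfullCells
  else if position.any (fun c => c.1 < 0 || c.1 > length - 1 || c.2 < 0 || c.2 > length - 1) then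
    pvRender 10 pvOutOfRangeCells
  else pvRender length position

-- ===== PRECONDITION & SPEC =====
def Spec_GridRegen (length : Int) (position : List (Int × Int)) (out : List (List Int)) : Prop := out = GridRegen_alt length position
instance (length : Int) (position : List (Int × Int)) (out : List (List Int)) : Decidable (Spec_GridRegen length position out) := by unfold Spec_GridRegen; infer_instance

-- ===== CLAIM (what is proved, stated in full; the proofs are below) =====
def Claim_equal_GridRegen : Prop := ∀ (length : Int) (position : List (Int × Int)), Dom_GridRegen length position → Spec_GridRegen length position (GridRegen length position)

-- ===== LEMMAS AND PROOFS =====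

-- a constant-zero map over a range is a replicate
lemma pv_replicate_range (a b : Int) :
    (PySem.List.pyRange a b 1).map (fun _ => (0 : Int)) = List.replicate (b - a).toNat 0 := by
  rw [List.map_const']
  simp [PySem.List.length_pyRange_one]

-- the run-length row construction produces the indicator row of its column list
lemma pv_rowFrom_eq (n : Int) (cols : List Int) (hs : cols.Pairwise (· < ·)) :
    ∀ (prev : Int) (acc : List Int), (∀ j ∈ cols, prev < j ∧ j < n) →
    pvRowFrom n prev acc cols
      = acc ++ (PySem.List.pyRange (prev + 1) n 1).map (fun k => if k ∈ cols then (1 : Int) else 0) := by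
  induction cols with
  | nil =>
    intro prev acc _
    have hmap : (PySem.List.pyRange (prev + 1) n 1).map
        (fun k => if k ∈ ([] : List Int) then (1 : Int) else 0)
        = List.replicate (n - prev - 1).toNat 0 := by
      have he : (PySem.List.pyRange (prev + 1) n 1).map
          (fun k => if k ∈ ([] : List Int) then (1 : Int) else 0)
          = (PySem.List.pyRange (prev + 1) n 1).map (fun _ => (0 : Int)) := by
        apply List.map_congr_left; intro k _; simp
      rw [he, pv_replicate_range]; congr 1; omega
    rw [pvRowFrom, hmap]
  | cons j rest ih =>
    intro prev acc hb
    obtain ⟨hpj, hjn⟩ := hb j (List.mem_cons_self ..)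
    have hrest_gt : ∀ b ∈ rest, j < b := by
      intro b hbm; exact (List.pairwise_cons.mp hs).1 b hbm
    have hb' : ∀ b ∈ rest, j < b ∧ b < n := by
      intro b hbm; exact ⟨hrest_gt b hbm, (hb b (List.mem_cons_of_mem _ hbm)).2⟩
    rw [pvRowFrom, ih (List.pairwise_cons.mp hs).2 j _ hb']
    have hsplit : PySem.List.pyRange (prev + 1) n 1
        = PySem.List.pyRange (prev + 1) j 1 ++ PySem.List.pyRange j (j + 1) 1
            ++ PySem.List.pyRange (j + 1) n 1 := by
      rw [← PySem.List.pyRange_one_append (prev + 1) j (j + 1) (by omega) (by omega),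
          ← PySem.List.pyRange_one_append (prev + 1) (j + 1) n (by omega) (by omega)]
    rw [hsplit, PySem.List.pyRange_one_singleton]
    simp only [List.map_append, List.map_cons, List.map_nil]
    have h1 : (PySem.List.pyRange (prev + 1) j 1).map
        (fun k => if k ∈ j :: rest then (1 : Int) else 0)
        = List.replicate (j - prev - 1).toNat 0 := by
      have he : (PySem.List.pyRange (prev + 1) j 1).map
          (fun k => if k ∈ j :: rest then (1 : Int) else 0)
          = (PySem.List.pyRange (prev + 1) j 1).map (fun _ => (0 : Int)) := by
        apply List.map_congr_left
        intro k hk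
        have hkj : k < j := (PySem.List.mem_pyRange_one.mp hk).2
        have hnm : k ∉ j :: rest := by
          simp only [List.mem_cons]
          rintro (rfl | hkr)
          · omega
          · exact absurd (hrest_gt k hkr) (by omega)
        simp [hnm]
      rw [he, pv_replicate_range]; congr 1; omega
    have h2 : (if j ∈ j :: rest then (1 : Int) else 0) = 1 := by simp
    have h3 : (PySem.List.pyRange (j + 1) n 1).map
        (fun k => if k ∈ j :: rest then (1 : Int) else 0)
        = (PySem.List.pyRange (j + 1) n 1).map (fun k => if k ∈ rest then (1 : Int) else 0) := by
      apply List.map_congr_left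
      intro k hk
      have hkj : j < k := by have := (PySem.List.mem_pyRange_one.mp hk).1; omega
      simp only [List.mem_cons]
      by_cases hkr : k ∈ rest
      · simp [hkr]
      · have hne : k ≠ j := by omega
        simp [hkr, hne]
    rw [h1, h2, h3]
    simp [List.append_assoc]

-- modifying row a of a grid of mapped rows over pyRange 0 n 1 rewrites it pointwise
lemma pv_modify_map_range (n a : Int) (ha0 : 0 ≤ a) (_han : a < n)
    (g : Int → List Int) (h : List Int → List Int) :
    ((PySem.List.pyRange 0 n 1).map g).modify a.toNat h
      = (PySem.List.pyRange 0 n 1).map (fun i => if i = a then h (g i) else g i) := by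
  apply List.ext_getElem
  · simp [List.length_modify]
  · intro k hk hk'
    have hkl : k < (PySem.List.pyRange 0 n 1).length := by
      simp only [List.length_modify, List.length_map] at hk
      exact hk
    have hR : (PySem.List.pyRange 0 n 1)[k] = (k : Int) := by
      simp [PySem.List.getElem_pyRange_one]
    rw [List.getElem_modify, List.getElem_map, List.getElem_map, hR]
    by_cases hka : (k : Int) = a
    · have : a.toNat = k := by omega
      simp [this, hka]
    · have : a.toNat ≠ k := by omega
      simp [this, hka]

-- setting entry b of a mapped row over pyRange 0 n 1 rewrites it pointwise
lemma pv_set_map_range (n b : Int) (hb0 : 0 ≤ b) (_hbn : b < n) (u : Int → Int) :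
    ((PySem.List.pyRange 0 n 1).map u).set b.toNat 1
      = (PySem.List.pyRange 0 n 1).map (fun j => if j = b then (1 : Int) else u j) := by
  apply List.ext_getElem
  · simp
  · intro k hk hk'
    have hkl : k < (PySem.List.pyRange 0 n 1).length := by
      simp only [List.length_set, List.length_map] at hk
      exact hk
    have hR : (PySem.List.pyRange 0 n 1)[k] = (k : Int) := by
      simp [PySem.List.getElem_pyRange_one]
    rw [List.getElem_set, List.getElem_map, List.getElem_map, hR]
    by_cases hkb : (k : Int) = b
    · have : b.toNat = k := by omega
      simp [this, hkb]
    · have : b.toNat ≠ k := by omega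
      simp [this, hkb]

-- the scatter fold over a functionally-described grid is a pointwise conditional update
lemma pv_scatter (n : Int) (l : List (Int × Int))
    (h : ∀ c ∈ l, 0 ≤ c.1 ∧ c.1 < n ∧ 0 ≤ c.2 ∧ c.2 < n) (f : Int → Int → Int) :
    l.foldl (fun g c => g.modify c.1.toNat (fun row => row.set c.2.toNat 1))
        ((PySem.List.pyRange 0 n 1).map (fun i => (PySem.List.pyRange 0 n 1).map (fun j => f i j)))
      = (PySem.List.pyRange 0 n 1).map (fun i => (PySem.List.pyRange 0 n 1).map
          (fun j => if (i, j) ∈ l then (1 : Int) else f i j)) := by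
  induction l generalizing f with
  | nil => simp
  | cons c l ih =>
    obtain ⟨h1, h2, h3, h4⟩ := h c (List.mem_cons_self ..)
    have hstep :
        ((PySem.List.pyRange 0 n 1).map (fun i => (PySem.List.pyRange 0 n 1).map (fun j => f i j))).modify
            c.1.toNat (fun row => row.set c.2.toNat 1)
          = (PySem.List.pyRange 0 n 1).map (fun i => (PySem.List.pyRange 0 n 1).map
              (fun j => if i = c.1 ∧ j = c.2 then (1 : Int) else f i j)) := by
      rw [pv_modify_map_range n c.1 h1 h2]
      apply List.map_congr_left
      intro i _
      by_cases hi : i = c.1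
      · rw [if_pos hi, pv_set_map_range n c.2 h3 h4]
        apply List.map_congr_left
        intro j _
        by_cases hj : j = c.2 <;> simp [hi, hj]
      · rw [if_neg hi]
        apply List.map_congr_left
        intro j _
        simp [hi]
    rw [List.foldl_cons, hstep, ih (fun c hc => h c (List.mem_cons_of_mem _ hc))]
    apply List.map_congr_left
    intro i _
    apply List.map_congr_left
    intro j _
    by_cases hl : (i, j) ∈ l
    · simp [hl]
    · by_cases hc : (i, j) = c
      · have : i = c.1 ∧ j = c.2 := by rw [← hc]; exact ⟨rfl, rfl⟩
        simp [this]
      · simp [hl, hc]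
        intro hi hj
        exact ((hc (Prod.ext_iff.mpr ⟨hi, hj⟩)).elim : (1 : Int) = f i j)

-- the main branch: guard passed, scatter grid = run-length grid
lemma pv_main (length : Int) (position : List (Int × Int))
    (hg3 : ¬ position.any (fun c => c.1 < 0 || c.1 > length - 1 || c.2 < 0 || c.2 > length - 1) = true) :
    position.foldl (fun g c => g.modify c.1.toNat (fun row => row.set c.2.toNat 1))
      ((PySem.List.pyRange 0 length 1).foldl (fun g _i =>
        g ++ [(PySem.List.pyRange 0 length 1).foldl (fun line _j => line ++ [(0 : Int)]) []]) [])
      = pvRender length position := by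
  -- main branch: guard passed, so every coordinate is in range
  have hin : ∀ c ∈ position, 0 ≤ c.1 ∧ c.1 < length ∧ 0 ≤ c.2 ∧ c.2 < length := by
    intro c hc
    have := fun h => hg3 (List.any_eq_true.2 ⟨c, hc, h⟩)
    simp only [Bool.or_eq_true, decide_eq_true_eq] at this
    constructor
    · by_contra h; exact this (by left; left; left; omega)
    constructor
    · by_contra h; exact this (by left; left; right; omega)
    constructor
    · by_contra h; exact this (by left; right; omega)
    · by_contra h; exact this (by right; omega)
  -- A side: zero grid as a map, then scatter pointwise
  have hzero : (PySem.List.pyRange 0 length 1).foldl (fun g _i =>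
      g ++ [(PySem.List.pyRange 0 length 1).foldl (fun line _j => line ++ [(0 : Int)]) []]) []
      = (PySem.List.pyRange 0 length 1).map (fun _ => (PySem.List.pyRange 0 length 1).map (fun _ => (0 : Int))) := by
    rw [PySem.List.foldl_append_singleton_eq_map
        (fun _ => (PySem.List.pyRange 0 length 1).foldl (fun line _j => line ++ [(0 : Int)]) []),
      PySem.List.foldl_append_singleton_eq_map (fun _ => (0 : Int))]
    simp
  rw [hzero, pv_scatter length position hin (fun _ _ => 0)]
  -- B side: outer fold as a map, each row via the run-length lemma
  unfold pvRender
  rw [PySem.List.foldl_append_singleton_eq_map (fun i => pvRowFrom length (-1) []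
        (PySem.List.sorted (PySem.Set.ofList ((position.filter (fun c => c.1 == i)).map (·.2)))
          (fun x => x) false))]
  apply List.map_congr_left
  intro i _
  set cols := PySem.List.sorted (PySem.Set.ofList ((position.filter (fun c => c.1 == i)).map (·.2)))
      (fun x => x) false with hcols
  have hmem : ∀ k, k ∈ cols ↔ (i, k) ∈ position := by
    intro k
    rw [hcols, PySem.List.mem_sorted, PySem.Set.mem_ofList]
    simp only [List.mem_map, List.mem_filter, beq_iff_eq]
    constructor
    · rintro ⟨c, ⟨hc, hci⟩, hck⟩
      have : c = (i, k) := Prod.ext_iff.mpr ⟨hci, hck⟩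
      rwa [this] at hc
    · intro h
      exact ⟨(i, k), ⟨h, rfl⟩, rfl⟩
  have hs : cols.Pairwise (· < ·) := by
    rw [hcols]; exact PySem.List.sorted_ofList_pairwise_lt _
  have hb : ∀ j ∈ cols, (-1 : Int) < j ∧ j < length := by
    intro j hj
    have := hin (i, j) ((hmem j).mp hj)
    omega
  rw [pv_rowFrom_eq length cols hs (-1) [] hb]
  simp only [List.nil_append, show (-1 : Int) + 1 = 0 by norm_num]
  apply List.map_congr_left
  intro j _
  by_cases hm : (i, j) ∈ position <;> simp [hm, hmem j]

-- ===== VERDICT (by name: the statement is the Claim_ definition above) =====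
theorem GridRegen_spec : Claim_equal_GridRegen := by
  intro length position _
  show GridRegen length position = GridRegen_alt length position
  unfold GridRegen GridRegen_alt
  split_ifs <;> first
    | decide
    | exact pv_main length position (by assumption)
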